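-- pv_equiv track=rewrite | github.com/6e5d/flatmark | flatmark/flatmark.py | lines2blocks
-- ===== SOURCE A (Python) =====
-- def lines2blocks(lines):
-- 	blocks = []
-- 	assert isinstance(lines, list)
-- 	tmp_block = []
-- 	for line in lines:
-- 		assert isinstance(line, str)
-- 		line = line.rstrip()
-- 		if not line:
-- 			if tmp_block:
-- 				blocks.append(tmp_block)
-- 			tmp_block = []
-- 			continue
-- 		tmp_block.append(line)
-- 	if tmp_block:
-- 		blocks.append(tmp_block)
-- 	return blocks
-- ===== SOURCE B (Python) =====
-- import itertools
--
-- def lines2blocks(lines):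
-- 	assert isinstance(lines, list)
-- 	stripped = []
-- 	for line in lines:
-- 		assert isinstance(line, str)
-- 		stripped.append(line.rstrip())
-- 	return [list(g) for k, g in itertools.groupby(stripped, key=bool) if k]
-- ===== Notes on version B (the rewrite author's own statement) =====
-- stated objective: idiomatic
-- what changed: Replaced the single-pass manual accumulator/flush loop with a two-pass map-then-partition decomposition: first rstrip every line, then itertools.groupby keyed on truthiness groups maximal runs of non-empty lines and drops the blank separators.
import Mathlib
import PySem

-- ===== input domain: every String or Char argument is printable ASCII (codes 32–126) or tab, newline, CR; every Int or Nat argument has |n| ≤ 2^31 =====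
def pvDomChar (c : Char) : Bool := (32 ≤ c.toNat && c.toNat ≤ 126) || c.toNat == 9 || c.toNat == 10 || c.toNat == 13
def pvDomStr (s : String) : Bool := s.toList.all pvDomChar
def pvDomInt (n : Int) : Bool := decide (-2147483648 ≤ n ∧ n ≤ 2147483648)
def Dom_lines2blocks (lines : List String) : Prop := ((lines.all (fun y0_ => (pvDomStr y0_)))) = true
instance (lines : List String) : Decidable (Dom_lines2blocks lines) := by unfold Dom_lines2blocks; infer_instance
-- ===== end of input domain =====

-- B replaces A's manual accumulator/flush loop by a map (rstrip) followed by grouping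
-- maximal runs of non-empty lines (groupby); same cost, more idiomatic decomposition.


-- ===== PORT A =====
-- literal transliteration of A: one loop carrying (blocks, tmp_block), flushing on blanks
def lines2blocks (lines : List String) : List (List String) :=
  let st := lines.foldl (fun (st : List (List String) × List String) line =>
    let blocks := st.1
    let tmp_block := st.2
    let line := PySem.Str.rstrip line
    if line = "" then
      (if tmp_block ≠ [] then blocks ++ [tmp_block] else blocks, [])
    else
      (blocks, tmp_block ++ [line])) ([], [])
  if st.2 ≠ [] then st.1 ++ [st.2] else st.1

-- ===== PORT B =====
-- groupby(stripped, key=bool): maximal runs of non-empty strings, blanks discarded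
def pvGroupRuns : List String → List (List String)
  | [] => []
  | x :: xs =>
    if x = "" then pvGroupRuns xs
    else (x :: xs.takeWhile (fun s => s ≠ "")) :: pvGroupRuns (xs.dropWhile (fun s => s ≠ ""))
termination_by l => l.length
decreasing_by
  · simp
  · exact Nat.lt_succ_of_le (xs.length_dropWhile_le _)

def lines2blocks_alt (lines : List String) : List (List String) :=
  let stripped := lines.map PySem.Str.rstrip
  pvGroupRuns stripped

-- ===== PRECONDITION & SPEC =====
def Spec_lines2blocks (lines : List String) (out : List (List String)) : Prop := out = lines2blocks_alt lines
instance (lines : List String) (out : List (List String)) : Decidable (Spec_lines2blocks lines out) := by unfold Spec_lines2blocks; infer_instance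

-- ===== CLAIM (what is proved, stated in full; the proofs are below) =====
def Claim_equal_lines2blocks : Prop := ∀ (lines : List String), Dom_lines2blocks lines → Spec_lines2blocks lines (lines2blocks lines)

-- ===== LEMMAS AND PROOFS =====

-- proof-side names for A's loop body and final flush
def pvStep (st : List (List String) × List String) (line : String) : List (List String) × List String :=
  let line := PySem.Str.rstrip line
  if line = "" then (if st.2 ≠ [] then st.1 ++ [st.2] else st.1, [])
  else (st.1, st.2 ++ [line])

def pvFlush (st : List (List String) × List String) : List (List String) :=
  if st.2 ≠ [] then st.1 ++ [st.2] else st.1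

-- proof-side accumulator-style grouping with a pending block
def pvG2 (tmp : List String) : List String → List (List String)
  | [] => if tmp = [] then [] else [tmp]
  | x :: xs => if x = "" then (if tmp = [] then pvG2 [] xs else tmp :: pvG2 [] xs) else pvG2 (tmp ++ [x]) xs

lemma pvA_eq (lines : List String) : lines2blocks lines = pvFlush (lines.foldl pvStep ([], [])) := rfl

-- A's loop (with final flush) equals pvG2 over the stripped lines
lemma pvFoldl_eq_g2 (ls : List String) : ∀ (blocks : List (List String)) (tmp : List String),
    pvFlush (ls.foldl pvStep (blocks, tmp)) = blocks ++ pvG2 tmp (ls.map PySem.Str.rstrip) := by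
  induction ls with
  | nil =>
    intro blocks tmp
    by_cases h : tmp = [] <;> simp [pvFlush, pvG2, h]
  | cons l ls ih =>
    intro blocks tmp
    simp only [List.foldl_cons, List.map_cons]
    by_cases h : PySem.Str.rstrip l = ""
    · by_cases ht : tmp = [] <;> simp [pvStep, h, ht, pvG2, ih]
    · simp [pvStep, h, pvG2, ih]

-- pvG2 characterised by maximal-run grouping
lemma pvG2_eq_groupRuns : ∀ (n : ℕ) (xs : List String), xs.length ≤ n → ∀ (tmp : List String),
    pvG2 tmp xs = if tmp = [] then pvGroupRuns xs
      else (tmp ++ xs.takeWhile (fun s => s ≠ "")) :: pvGroupRuns (xs.dropWhile (fun s => s ≠ "")) := by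
  intro n
  induction n with
  | zero =>
    intro xs hxs tmp
    have : xs = [] := List.length_eq_zero_iff.mp (Nat.le_zero.mp hxs)
    subst this
    by_cases h : tmp = [] <;> simp [pvG2, pvGroupRuns, h]
  | succ n ih =>
    intro xs hxs tmp
    match xs with
    | [] => by_cases h : tmp = [] <;> simp [pvG2, pvGroupRuns, h]
    | x :: xs' =>
      have hlen : xs'.length ≤ n := by simpa using Nat.lt_succ_iff.mp (Nat.lt_of_lt_of_le (by simp) hxs)
      by_cases hx : x = ""
      · by_cases ht : tmp = []
        · simp [pvG2, pvGroupRuns, hx, ht, ih xs' hlen []]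
        · simp [pvG2, pvGroupRuns, hx, ht, ih xs' hlen []]
      · by_cases ht : tmp = []
        · subst ht
          rw [show pvG2 [] (x :: xs') = pvG2 ([] ++ [x]) xs' by simp [pvG2, hx]]
          rw [ih xs' hlen ([] ++ [x])]
          simp [pvGroupRuns, hx]
        · rw [show pvG2 tmp (x :: xs') = pvG2 (tmp ++ [x]) xs' by simp [pvG2, hx]]
          rw [ih xs' hlen (tmp ++ [x])]
          have hne : tmp ++ [x] ≠ [] := by simp
          simp [hne, ht, hx]

-- ===== VERDICT (by name: the statement is the Claim_ definition above) =====
theorem lines2blocks_spec : Claim_equal_lines2blocks := by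
  intro lines _
  unfold Spec_lines2blocks lines2blocks_alt
  rw [pvA_eq, pvFoldl_eq_g2 lines [] []]
  simpa using pvG2_eq_groupRuns (lines.map PySem.Str.rstrip).length _ le_rfl []
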